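-- pv_equiv track=rewrite | github.com/vikash5507/whiteboard_algo_practice | actual_interviews/zepto_round_1.py | preComputePossibleSum
-- ===== SOURCE A (Python) =====
-- def preComputePossibleSum(A, B):
--     possible_sum = {}
--     for a in A:
--         for b in B:
--             if a + b in possible_sum:
--                 possible_sum[a + b] += 1
--             else:
--                 possible_sum[a + b] = 1
--
--     return possible_sum
-- ===== SOURCE B (Python) =====
-- def preComputePossibleSum(A, B):
--     ca = {}
--     for a in A:
--         ca[a] = ca.get(a, 0) + 1
--     cb = {}
--     for b in B:
--         cb[b] = cb.get(b, 0) + 1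
--     res = {}
--     for va, na in ca.items():
--         for vb, nb in cb.items():
--             res[va + vb] = res.get(va + vb, 0) + na * nb
--     return res
-- ===== Notes on version B (the rewrite author's own statement) =====
-- stated objective: alternative
-- what changed: B first builds frequency tables Counter-style for A and B, then iterates over the distinct value pairs adding ca*cb to each sum's total, instead of incrementing by one for every raw element pair; the dict insertion order provably coincides.
import Mathlib
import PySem

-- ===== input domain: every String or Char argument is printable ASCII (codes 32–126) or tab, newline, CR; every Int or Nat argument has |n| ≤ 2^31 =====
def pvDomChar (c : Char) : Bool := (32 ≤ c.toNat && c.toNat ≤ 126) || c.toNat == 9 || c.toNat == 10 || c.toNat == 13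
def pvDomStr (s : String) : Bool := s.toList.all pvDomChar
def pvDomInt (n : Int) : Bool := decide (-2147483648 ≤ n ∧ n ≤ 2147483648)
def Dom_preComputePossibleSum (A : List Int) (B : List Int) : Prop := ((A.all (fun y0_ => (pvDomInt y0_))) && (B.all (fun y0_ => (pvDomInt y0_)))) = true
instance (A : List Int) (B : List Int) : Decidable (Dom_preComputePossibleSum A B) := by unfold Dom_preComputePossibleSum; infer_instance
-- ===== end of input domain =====

-- B builds frequency tables of A and B first and adds ca*cb per distinct value pair, instead of
-- incrementing by one per raw pair (objective: an alternative aggregation over distinct values).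


-- ===== PORT A =====
def preComputePossibleSum (A : List Int) (B : List Int) : List (Int × Int) :=
  (A.foldl (fun d a =>
    B.foldl (fun d b =>
      if d.contains (a + b) then d.insert (a + b) (d.getD (a + b) 0 + 1)
      else d.insert (a + b) 1) d) PySem.Dict.empty).items

-- ===== PORT B =====
def preComputePossibleSum_alt (A : List Int) (B : List Int) : List (Int × Int) :=
  let ca := A.foldl (fun d a => d.insert a (d.getD a 0 + 1)) PySem.Dict.empty
  let cb := B.foldl (fun d b => d.insert b (d.getD b 0 + 1)) PySem.Dict.empty
  (ca.items.foldl (fun r p =>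
    cb.items.foldl (fun r q =>
      r.insert (p.1 + q.1) (r.getD (p.1 + q.1) 0 + p.2 * q.2)) r) PySem.Dict.empty).items

-- ===== PRECONDITION & SPEC =====
def Spec_preComputePossibleSum (A : List Int) (B : List Int) (out : List (Int × Int)) : Prop := out = preComputePossibleSum_alt A B
instance (A : List Int) (B : List Int) (out : List (Int × Int)) : Decidable (Spec_preComputePossibleSum A B out) := by unfold Spec_preComputePossibleSum; infer_instance

-- ===== CLAIM (what is proved, stated in full; the proofs are below) =====
def Claim_equal_preComputePossibleSum : Prop := ∀ (A : List Int) (B : List Int), Dom_preComputePossibleSum A B → Spec_preComputePossibleSum A B (preComputePossibleSum A B)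

-- ===== LEMMAS AND PROOFS =====

-- bump key p.1 by weight p.2 (the single dict-update shape both ports use)
def pvStep (d : PySem.Dict Int Int) (p : Int × Int) : PySem.Dict Int Int :=
  d.insert p.1 (d.getD p.1 0 + p.2)

def pvApply (d : PySem.Dict Int Int) (U : List (Int × Int)) : PySem.Dict Int Int :=
  U.foldl pvStep d

-- total weight contributed to key k by the update list U
def pvWt (U : List (Int × Int)) (k : Int) : Int :=
  (U.map (fun p => if p.1 = k then p.2 else 0)).sum

-- first-occurrence dedup of l relative to an already-seen list
def pvFd (seen : List Int) : List Int → List Int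
  | [] => []
  | k :: ks => if k ∈ seen then pvFd seen ks else k :: pvFd (k :: seen) ks

lemma pvFd_congr {s s' : List Int} (h : ∀ x, x ∈ s ↔ x ∈ s') : ∀ l, pvFd s l = pvFd s' l := by
  intro l
  induction l generalizing s s' with
  | nil => rfl
  | cons k ks ih =>
    simp only [pvFd]
    by_cases hk : k ∈ s
    · rw [if_pos hk, if_pos ((h k).1 hk)]; exact ih h
    · rw [if_neg hk, if_neg (fun hx => hk ((h k).2 hx))]
      congr 1
      exact ih (by intro x; simp [h x])

lemma mem_pvFd {x : Int} : ∀ {s l : List Int}, x ∈ pvFd s l ↔ x ∈ l ∧ x ∉ s := by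
  intro s l
  induction l generalizing s with
  | nil => simp [pvFd]
  | cons k ks ih =>
    simp only [pvFd]
    by_cases hk : k ∈ s
    · rw [if_pos hk]
      rw [ih]
      constructor
      · rintro ⟨h1, h2⟩; exact ⟨List.mem_cons_of_mem _ h1, h2⟩
      · rintro ⟨h1, h2⟩
        rcases List.mem_cons.1 h1 with rfl | h1
        · exact absurd hk h2
        · exact ⟨h1, h2⟩
    · rw [if_neg hk]
      simp only [List.mem_cons, ih, List.mem_cons]
      constructor
      · rintro (rfl | ⟨h1, h2⟩)
        · exact ⟨Or.inl rfl, hk⟩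
        · exact ⟨Or.inr h1, fun h => h2 (Or.inr h)⟩
      · rintro ⟨rfl | h1, h2⟩
        · exact Or.inl rfl
        · by_cases hxk : x = k
          · exact Or.inl hxk
          · exact Or.inr ⟨h1, fun h => (by rcases h with h | h; exact hxk h; exact h2 h : False)⟩

lemma nodup_pvFd : ∀ (s l : List Int), (pvFd s l).Nodup := by
  intro s l
  induction l generalizing s with
  | nil => simp [pvFd]
  | cons k ks ih =>
    simp only [pvFd]
    by_cases hk : k ∈ s
    · rw [if_pos hk]; exact ih s
    · rw [if_neg hk]
      refine List.nodup_cons.2 ⟨fun h => ?_, ih _⟩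
      exact (mem_pvFd.1 h).2 (List.mem_cons_self)

lemma pvFd_nil_of_subset {s l : List Int} (h : ∀ x ∈ l, x ∈ s) : pvFd s l = [] := by
  induction l with
  | nil => rfl
  | cons k ks ih =>
    simp only [pvFd, if_pos (h k List.mem_cons_self)]
    exact ih (fun x hx => h x (List.mem_cons_of_mem _ hx))

lemma pvFd_append (s l₁ l₂ : List Int) :
    pvFd s (l₁ ++ l₂) = pvFd s l₁ ++ pvFd (l₁ ++ s) l₂ := by
  induction l₁ generalizing s with
  | nil => simp [pvFd]
  | cons k ks ih =>
    simp only [List.cons_append, pvFd]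
    by_cases hk : k ∈ s
    · rw [if_pos hk, if_pos hk, ih]
      congr 1
      refine pvFd_congr (fun x => ?_) l₂
      simp only [List.mem_append, List.mem_cons]
      constructor
      · tauto
      · rintro ((rfl | h) | h) <;> tauto
    · rw [if_neg hk, if_neg hk, ih, List.cons_append]
      congr 2
      refine pvFd_congr (fun x => ?_) l₂
      simp only [List.mem_append, List.mem_cons]
      tauto

-- PySem.Set.ofList is exactly first-occurrence dedup
lemma setOfList_eq_pvFd (l : List Int) : PySem.Set.ofList l = pvFd [] l := by
  suffices h : ∀ (acc : List Int), List.foldl PySem.Set.add acc l = acc ++ pvFd acc l by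
    simpa [PySem.Set.ofList, PySem.Set.empty] using h []
  induction l with
  | nil => intro acc; simp [pvFd]
  | cons k ks ih =>
    intro acc
    simp only [List.foldl_cons, pvFd, PySem.Set.add]
    by_cases hk : k ∈ acc
    · rw [if_pos (by simpa using hk), if_pos hk, ih]
    · rw [if_neg (by simpa using hk), if_neg hk, ih]
      have h2 : pvFd (acc ++ [k]) ks = pvFd (k :: acc) ks := by
        refine pvFd_congr (fun x => ?_) ks
        simp only [List.mem_append, List.mem_cons]
        tauto
      rw [h2]
      simp

-- basic Dict facts used by the normal-form lemma
lemma dict_contains_iff (d : PySem.Dict Int Int) (k : Int) :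
    d.contains k = true ↔ k ∈ d.keys := by
  simp [PySem.Dict.contains, PySem.Dict.keys, List.any_eq_true]

lemma dict_getD_of_not_mem (d : PySem.Dict Int Int) (k : Int) (v : Int) (h : k ∉ d.keys) :
    d.getD k v = v := by
  simp only [PySem.Dict.getD, PySem.Dict.get?]
  rw [List.find?_eq_none.2]
  · rfl
  · intro p hp hbeq
    exact h (by simp only [PySem.Dict.keys, List.mem_map]; exact ⟨p, hp, (beq_iff_eq.1 hbeq : p.1 = k)⟩)

lemma find?_key_of_mem_nodup (k v : Int) :
    ∀ (l : List (Int × Int)), (l.map Prod.fst).Nodup → (k, v) ∈ l →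
      l.find? (fun p => p.1 == k) = some (k, v) := by
  intro l
  induction l with
  | nil => intro _ h; simp at h
  | cons p l' ih =>
    intro hnd hmem
    simp only [List.map_cons, List.nodup_cons] at hnd
    by_cases hpk : p.1 = k
    · have hp : p = (k, v) := by
        rcases List.mem_cons.1 hmem with h | h
        · exact h.symm
        · exact absurd (by rw [hpk]; exact List.mem_map.2 ⟨(k, v), h, rfl⟩) hnd.1
      rw [List.find?_cons_of_pos (by simp [hpk]), hp]
    · rw [List.find?_cons_of_neg (by simp [hpk])]
      refine ih hnd.2 ?_
      rcases List.mem_cons.1 hmem with h | h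
      · exact absurd (by rw [← h]) hpk
      · exact h

lemma dict_getD_of_mem_nodup (d : PySem.Dict Int Int) (k v : Int)
    (hnd : d.keys.Nodup) (hmem : (k, v) ∈ d.items) : d.getD k 0 = v := by
  simp only [PySem.Dict.getD, PySem.Dict.get?]
  rw [find?_key_of_mem_nodup k v d.items hnd hmem]
  rfl

-- weight bookkeeping
lemma pvWt_cons (p : Int × Int) (U : List (Int × Int)) (k : Int) :
    pvWt (p :: U) k = (if p.1 = k then p.2 else 0) + pvWt U k := by
  simp [pvWt]

lemma pvWt_append (U V : List (Int × Int)) (k : Int) :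
    pvWt (U ++ V) k = pvWt U k + pvWt V k := by
  simp [pvWt]

-- NORMAL FORM: folding bump-updates U into a dict d (with nodup keys) yields the old entries with
-- their totals added, followed by the new keys in first-occurrence order, each with its total weight.
lemma pvApply_items : ∀ (U : List (Int × Int)) (d : PySem.Dict Int Int), d.keys.Nodup →
    (pvApply d U).items =
      d.items.map (fun p => (p.1, p.2 + pvWt U p.1)) ++
      (pvFd d.keys (U.map Prod.fst)).map (fun k => (k, pvWt U k)) := by
  intro U
  induction U with
  | nil => intro d _; simp [pvApply, pvWt, pvFd]
  | cons p U' ih =>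
    intro d hnd
    obtain ⟨k, w⟩ := p
    have step1 : pvApply d ((k, w) :: U') = pvApply (pvStep d (k, w)) U' := rfl
    rw [step1]
    by_cases hk : k ∈ d.keys
    · have hc : d.contains k = true := (dict_contains_iff d k).2 hk
      have hitems : (pvStep d (k, w)).items =
          d.items.map (fun q => if q.1 == k then (k, d.getD k 0 + w) else q) := by
        simp [pvStep, PySem.Dict.insert, hc]
      have hkeys : (pvStep d (k, w)).keys = d.keys := by
        simp only [PySem.Dict.keys, hitems, List.map_map]
        apply List.map_congr_left
        intro q hq
        by_cases h : q.1 = k <;> simp [h]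
      rw [ih _ (by rw [hkeys]; exact hnd)]
      rw [hkeys, hitems]
      congr 1
      · rw [List.map_map]
        apply List.map_congr_left
        intro q hq
        by_cases h : q.1 = k
        · have hv : d.getD k 0 = q.2 := by
            apply dict_getD_of_mem_nodup d k q.2 hnd
            rw [← h]; exact hq
          simp only [Function.comp_apply, h, beq_self_eq_true, if_pos, pvWt_cons, hv]
          simp
          ring
        · simp only [Function.comp_apply, pvWt_cons]
          simp [h]
          intro hh; exact absurd hh.symm h
      · simp only [List.map_cons]
        rw [show pvFd d.keys (k :: U'.map Prod.fst) = pvFd d.keys (U'.map Prod.fst) from by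
          simp [pvFd, hk]]
        apply List.map_congr_left
        intro k' hk'
        have hnm : k' ∉ d.keys := (mem_pvFd.1 hk').2
        have hne : ¬ (k = k') := fun h => hnm (h ▸ hk)
        simp [pvWt_cons, hne]
    · have hc : d.contains k = false := by
        cases h : d.contains k
        · rfl
        · exact absurd ((dict_contains_iff d k).1 h) hk
      have hitems : (pvStep d (k, w)).items = d.items ++ [(k, 0 + w)] := by
        simp [pvStep, PySem.Dict.insert, hc, dict_getD_of_not_mem d k 0 hk]
      have hkeys : (pvStep d (k, w)).keys = d.keys ++ [k] := by
        simp [PySem.Dict.keys, hitems]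
      have hnd' : (pvStep d (k, w)).keys.Nodup := by
        rw [hkeys, List.nodup_append]
        refine ⟨hnd, by simp, ?_⟩
        intro a ha b hb
        simp only [List.mem_singleton] at hb
        subst hb
        intro h
        exact hk (h ▸ ha)
      rw [ih _ hnd', hkeys, hitems]
      simp only [List.map_cons]
      rw [show pvFd d.keys (k :: U'.map Prod.fst) = k :: pvFd (k :: d.keys) (U'.map Prod.fst) from by
          simp [pvFd, hk]]
      rw [List.map_append, List.append_assoc]
      congr 1
      · apply List.map_congr_left
        intro q hq
        have hqk : ¬ (k = q.1) := by
          intro h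
          exact hk (by rw [h]; exact List.mem_map.2 ⟨q, hq, rfl⟩)
        simp [pvWt_cons, hqk]
      · rw [List.map_singleton, List.singleton_append]
        congr 1
        · simp [pvWt_cons]
        · rw [show pvFd (d.keys ++ [k]) (U'.map Prod.fst) = pvFd (k :: d.keys) (U'.map Prod.fst) from
            pvFd_congr (fun x => by simp [or_comm]) _]
          apply List.map_congr_left
          intro k' hk'
          have hne : ¬ (k = k') := by
            intro h
            exact (mem_pvFd.1 hk').2 (by rw [← h]; exact List.mem_cons_self)
          simp [pvWt_cons, hne]

lemma pvApply_empty_items (U : List (Int × Int)) :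
    (pvApply PySem.Dict.empty U).items = (pvFd [] (U.map Prod.fst)).map (fun k => (k, pvWt U k)) := by
  rw [pvApply_items U PySem.Dict.empty (by simp [PySem.Dict.empty, PySem.Dict.keys])]
  simp [PySem.Dict.empty, PySem.Dict.keys]

-- the explicit update lists the two ports fold
def pvUA (A B : List Int) : List (Int × Int) :=
  A.flatMap (fun a => B.map (fun b => (a + b, (1 : Int))))

def pvUB (A B : List Int) : List (Int × Int) :=
  (pvFd [] A).flatMap (fun va => (pvFd [] B).map
    (fun vb => (va + vb, ((A.count va : Int)) * ((B.count vb : Int)))))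

lemma pvApply_append (d : PySem.Dict Int Int) (U V : List (Int × Int)) :
    pvApply d (U ++ V) = pvApply (pvApply d U) V := List.foldl_append

lemma step_if (d : PySem.Dict Int Int) (k : Int) :
    (if d.contains k then d.insert k (d.getD k 0 + 1) else d.insert k 1) = pvStep d (k, 1) := by
  by_cases h : d.contains k = true
  · simp [pvStep, h]
  · have hk : k ∉ d.keys := fun hm => h ((dict_contains_iff d k).2 hm)
    rw [if_neg (by simp [h]), pvStep]
    rw [dict_getD_of_not_mem d k 0 hk]
    norm_num

lemma portA_eq_apply' (B : List Int) : ∀ (A : List Int) (d : PySem.Dict Int Int),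
    A.foldl (fun d a =>
      B.foldl (fun d b =>
        if d.contains (a + b) then d.insert (a + b) (d.getD (a + b) 0 + 1)
        else d.insert (a + b) 1) d) d
      = pvApply d (A.flatMap (fun a => B.map (fun b => (a + b, (1 : Int))))) := by
  intro A
  induction A with
  | nil => intro d; simp [pvApply]
  | cons a A' ihA =>
    intro d
    simp only [List.foldl_cons, List.flatMap_cons]
    rw [pvApply_append, ← ihA]
    congr 1
    have hfun : (fun (d : PySem.Dict Int Int) (b : Int) =>
        if d.contains (a + b) then d.insert (a + b) (d.getD (a + b) 0 + 1)
        else d.insert (a + b) 1)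
        = fun d b => pvStep d (a + b, 1) := by
      funext d b
      exact step_if d (a + b)
    rw [hfun, pvApply, List.foldl_map]

lemma portA_eq_apply (A B : List Int) :
    preComputePossibleSum A B = (pvApply PySem.Dict.empty (pvUA A B)).items := by
  unfold preComputePossibleSum pvUA
  rw [portA_eq_apply' B A PySem.Dict.empty]

lemma portB_inner (M : List (Int × Int)) : ∀ (L : List (Int × Int)) (d : PySem.Dict Int Int),
    L.foldl (fun r p =>
      M.foldl (fun r q => r.insert (p.1 + q.1) (r.getD (p.1 + q.1) 0 + p.2 * q.2)) r) d
      = pvApply d (L.flatMap (fun p => M.map (fun q => (p.1 + q.1, p.2 * q.2)))) := by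
  intro L
  induction L with
  | nil => intro d; simp [pvApply]
  | cons p L' ihL =>
    intro d
    simp only [List.foldl_cons, List.flatMap_cons]
    rw [pvApply_append, ← ihL]
    congr 1
    rw [pvApply, List.foldl_map]
    rfl

lemma portB_eq_apply (A B : List Int) :
    preComputePossibleSum_alt A B = (pvApply PySem.Dict.empty (pvUB A B)).items := by
  unfold preComputePossibleSum_alt
  have hca : A.foldl (fun d a => d.insert a (d.getD a 0 + 1)) PySem.Dict.empty
      = PySem.Dict.counter A := PySem.Dict.foldl_insert_getD_add_one_eq_counter A
  have hcb : B.foldl (fun d b => d.insert b (d.getD b 0 + 1)) PySem.Dict.empty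
      = PySem.Dict.counter B := PySem.Dict.foldl_insert_getD_add_one_eq_counter B
  simp only [hca, hcb]
  rw [portB_inner]
  congr 1
  rw [PySem.Dict.items_counter, PySem.Dict.items_counter, setOfList_eq_pvFd, setOfList_eq_pvFd]
  unfold pvUB
  rw [List.flatMap_map]
  simp [List.map_map, Function.comp_def]

-- ===== key order: the first-occurrence order of the sums over raw pairs equals the one over distinct pairs
lemma pvFd_outer (B : List Int) : ∀ (A seen sA : List Int),
    (∀ a ∈ sA, ∀ b ∈ B, (a + b) ∈ seen) →
    pvFd seen ((pvFd sA A).flatMap (fun a => B.map (fun b => a + b)))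
      = pvFd seen (A.flatMap (fun a => B.map (fun b => a + b))) := by
  intro A
  induction A with
  | nil => intro seen sA _; simp [pvFd]
  | cons a A' ih =>
    intro seen sA hyp
    simp only [List.flatMap_cons, pvFd]
    by_cases ha : a ∈ sA
    · rw [if_pos ha]
      rw [pvFd_append]
      rw [pvFd_nil_of_subset (s := seen) (l := B.map (fun b => a + b)) (fun x hx => by
        obtain ⟨b, hb, rfl⟩ := List.mem_map.1 hx
        exact hyp a ha b hb)]
      rw [List.nil_append]
      rw [pvFd_congr (s := B.map (fun b => a + b) ++ seen) (s' := seen) (fun x => by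
        constructor
        · intro hx
          rcases List.mem_append.1 hx with hx | hx
          · obtain ⟨b, hb, rfl⟩ := List.mem_map.1 hx
            exact hyp a ha b hb
          · exact hx
        · intro hx; exact List.mem_append.2 (Or.inr hx)) _]
      exact ih seen sA hyp
    · rw [if_neg ha]
      simp only [List.flatMap_cons]
      rw [pvFd_append, pvFd_append]
      congr 1
      rw [ih (B.map (fun b => a + b) ++ seen) (a :: sA) (by
        intro a' ha' b hb
        rcases List.mem_cons.1 ha' with rfl | ha'
        · exact List.mem_append.2 (Or.inl (List.mem_map.2 ⟨b, hb, rfl⟩))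
        · exact List.mem_append.2 (Or.inr (hyp a' ha' b hb)))]

lemma pvFd_inner_block (g : Int → Int) : ∀ (B seen sB : List Int),
    (∀ b ∈ sB, g b ∈ seen) →
    pvFd seen ((pvFd sB B).map g) = pvFd seen (B.map g) := by
  intro B
  induction B with
  | nil => intro seen sB _; simp [pvFd]
  | cons b B' ih =>
    intro seen sB hyp
    by_cases hb : b ∈ sB
    · rw [show pvFd sB (b :: B') = pvFd sB B' from by simp [pvFd, hb]]
      rw [ih seen sB hyp, List.map_cons]
      rw [show pvFd seen (g b :: B'.map g) = pvFd seen (B'.map g) from by simp [pvFd, hyp b hb]]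
    · rw [show pvFd sB (b :: B') = b :: pvFd (b :: sB) B' from by simp [pvFd, hb]]
      rw [List.map_cons, List.map_cons]
      by_cases hg : g b ∈ seen
      · rw [show pvFd seen (g b :: (pvFd (b :: sB) B').map g)
            = pvFd seen ((pvFd (b :: sB) B').map g) from by simp [pvFd, hg]]
        rw [show pvFd seen (g b :: B'.map g) = pvFd seen (B'.map g) from by simp [pvFd, hg]]
        refine ih seen (b :: sB) (fun b' hb' => ?_)
        rcases List.mem_cons.1 hb' with rfl | h
        · exact hg
        · exact hyp b' h
      · rw [show pvFd seen (g b :: (pvFd (b :: sB) B').map g)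
            = g b :: pvFd (g b :: seen) ((pvFd (b :: sB) B').map g) from by simp [pvFd, hg]]
        rw [show pvFd seen (g b :: B'.map g) = g b :: pvFd (g b :: seen) (B'.map g) from by
          simp [pvFd, hg]]
        congr 1
        refine ih (g b :: seen) (b :: sB) (fun b' hb' => ?_)
        rcases List.mem_cons.1 hb' with rfl | h
        · exact List.mem_cons_self
        · exact List.mem_cons_of_mem _ (hyp b' h)

lemma pvFd_inner (B : List Int) : ∀ (xs seen : List Int),
    pvFd seen (xs.flatMap (fun a => (pvFd [] B).map (fun b => a + b)))
      = pvFd seen (xs.flatMap (fun a => B.map (fun b => a + b))) := by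
  intro xs
  induction xs with
  | nil => intro seen; simp
  | cons a xs' ih =>
    intro seen
    simp only [List.flatMap_cons]
    rw [pvFd_append, pvFd_append]
    congr 1
    · exact pvFd_inner_block (fun b => a + b) B seen [] (by simp)
    · rw [pvFd_congr (s := (pvFd [] B).map (fun b => a + b) ++ seen)
          (s' := B.map (fun b => a + b) ++ seen) (fun x => by
        simp only [List.mem_append, List.mem_map]
        constructor
        · rintro (⟨b, hb, rfl⟩ | hx)
          · exact Or.inl ⟨b, (mem_pvFd.1 hb).1, rfl⟩
          · exact Or.inr hx
        · rintro (⟨b, hb, rfl⟩ | hx)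
          · exact Or.inl ⟨b, mem_pvFd.2 ⟨hb, by simp⟩, rfl⟩
          · exact Or.inr hx) _]
      exact ih _

lemma keys_eq (A B : List Int) :
    pvFd [] ((pvUA A B).map Prod.fst) = pvFd [] ((pvUB A B).map Prod.fst) := by
  have hA : (pvUA A B).map Prod.fst = A.flatMap (fun a => B.map (fun b => a + b)) := by
    unfold pvUA
    rw [List.map_flatMap]
    congr 1
    funext a
    rw [List.map_map]
    rfl
  have hB : (pvUB A B).map Prod.fst
      = (pvFd [] A).flatMap (fun a => (pvFd [] B).map (fun b => a + b)) := by
    unfold pvUB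
    rw [List.map_flatMap]
    congr 1
    funext va
    rw [List.map_map]
    rfl
  rw [hA, hB, pvFd_inner B (pvFd [] A) [], pvFd_outer B A [] [] (by simp)]

-- ===== weights: per-key totals agree
lemma pvWt_flatMap (f : Int → List (Int × Int)) (k : Int) : ∀ (l : List Int),
    pvWt (l.flatMap f) k = (l.map (fun a => pvWt (f a) k)).sum := by
  intro l
  induction l with
  | nil => simp [pvWt]
  | cons a l' ih => simp only [List.flatMap_cons, pvWt_append, ih, List.map_cons, List.sum_cons]

lemma wt_blockA (B : List Int) (a k : Int) :
    pvWt (B.map (fun b => (a + b, (1 : Int)))) k = (B.count (k - a) : Int) := by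
  induction B with
  | nil => simp [pvWt]
  | cons b B' ih =>
    simp only [List.map_cons, pvWt_cons, ih, List.count_cons]
    by_cases h : a + b = k
    · have hb : (b == k - a) = true := by simp only [beq_iff_eq]; omega
      rw [if_pos h, hb]
      simp only [if_true]
      push_cast
      ring
    · have hb : (b == k - a) = false := by
        simp only [beq_eq_false_iff_ne, ne_eq]
        omega
      rw [if_neg h, hb]
      simp only [Bool.false_eq_true, if_false]
      push_cast
      ring

lemma sum_pick (h : Int → Int) : ∀ (d : List Int), d.Nodup → ∀ (t : Int),
    (d.map (fun v => if v = t then h v else 0)).sum = if t ∈ d then h t else 0 := by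
  intro d
  induction d with
  | nil => intro _ t; simp
  | cons v d' ih =>
    intro hnd t
    rw [List.nodup_cons] at hnd
    simp only [List.map_cons, List.sum_cons]
    by_cases hv : v = t
    · subst hv
      rw [if_pos rfl, ih hnd.2 v, if_neg hnd.1, if_pos List.mem_cons_self]
      ring
    · rw [if_neg hv, ih hnd.2 t]
      by_cases ht : t ∈ d'
      · rw [if_pos ht, if_pos (List.mem_cons_of_mem _ ht)]
        ring
      · rw [if_neg ht, if_neg (by
          intro hc
          rcases List.mem_cons.1 hc with h' | h'
          · exact hv h'.symm
          · exact ht h')]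
        ring

lemma wt_blockB (A B : List Int) (va k : Int) :
    pvWt ((pvFd [] B).map (fun vb => (va + vb, ((A.count va : Int)) * ((B.count vb : Int))))) k
      = (A.count va : Int) * (B.count (k - va) : Int) := by
  unfold pvWt
  rw [List.map_map]
  have hcong : ((fun p : Int × Int => if p.1 = k then p.2 else 0) ∘
      (fun vb => (va + vb, ((A.count va : Int)) * ((B.count vb : Int)))))
      = fun vb => if vb = k - va then (fun v => (A.count va : Int) * (B.count v : Int)) vb else 0 := by
    funext vb
    simp only [Function.comp_apply]
    by_cases h : va + vb = k
    · rw [if_pos h, if_pos (by omega : vb = k - va)]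
    · rw [if_neg h, if_neg (by omega : ¬ (vb = k - va))]
  rw [hcong, sum_pick _ (pvFd [] B) (nodup_pvFd [] B) (k - va)]
  by_cases hm : k - va ∈ pvFd [] B
  · rw [if_pos hm]
  · rw [if_neg hm]
    have : (k - va) ∉ B := fun hb => hm (mem_pvFd.2 ⟨hb, by simp⟩)
    rw [List.count_eq_zero.2 this]
    push_cast
    ring

lemma group_sum (g : Int → Int) (d : List Int) (hnd : d.Nodup) : ∀ (A : List Int),
    (∀ a ∈ A, a ∈ d) →
    (A.map g).sum = (d.map (fun v => ((A.count v : Int)) * g v)).sum := by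
  intro A
  induction A with
  | nil => intro _; simp
  | cons a A' ih =>
    intro hsub
    have h1 : (d.map (fun v => (((a :: A').count v : Int)) * g v)).sum
        = (d.map (fun v => ((A'.count v : Int)) * g v + (if v = a then g v else 0))).sum := by
      congr 1
      apply List.map_congr_left
      intro v _
      rw [List.count_cons]
      push_cast
      by_cases hva : v = a
      · rw [if_pos (by simp [hva]), if_pos hva]
        ring
      · rw [if_neg (by simp; omega), if_neg hva]
        ring
    rw [h1]
    rw [PySem.List.sum_map_add_int]
    rw [sum_pick g d hnd a, if_pos (hsub a List.mem_cons_self)]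
    rw [List.map_cons, List.sum_cons, ← ih (fun x hx => hsub x (List.mem_cons_of_mem _ hx))]
    ring

lemma wt_eq (A B : List Int) (k : Int) : pvWt (pvUA A B) k = pvWt (pvUB A B) k := by
  unfold pvUA pvUB
  rw [pvWt_flatMap, pvWt_flatMap]
  have hA : (A.map (fun a => pvWt (B.map (fun b => (a + b, (1 : Int)))) k))
      = A.map (fun a => (B.count (k - a) : Int)) := by
    apply List.map_congr_left
    intro a _
    exact wt_blockA B a k
  have hB : ((pvFd [] A).map (fun va => pvWt ((pvFd [] B).map
        (fun vb => (va + vb, ((A.count va : Int)) * ((B.count vb : Int))))) k))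
      = (pvFd [] A).map (fun va => ((A.count va : Int)) * ((B.count (k - va) : Int))) := by
    apply List.map_congr_left
    intro va _
    exact wt_blockB A B va k
  rw [hA, hB]
  exact group_sum (fun a => (B.count (k - a) : Int)) (pvFd [] A) (nodup_pvFd [] A) A
    (fun a ha => mem_pvFd.2 ⟨ha, by simp⟩)

-- ===== VERDICT (by name: the statement is the Claim_ definition above) =====
theorem preComputePossibleSum_spec : Claim_equal_preComputePossibleSum := by
  unfold Claim_equal_preComputePossibleSum
  intro A B _
  unfold Spec_preComputePossibleSum
  rw [portA_eq_apply, portB_eq_apply, pvApply_empty_items, pvApply_empty_items]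
  rw [keys_eq A B]
  apply List.map_congr_left
  intro k _
  rw [wt_eq A B k]
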